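-- pv_equiv track=rewrite | github.com/MMuneendrareddy/pythonprograms_reversing | strong number.py | strnum
-- ===== SOURCE A (Python) =====
-- def strnum(n) :
--     total = 0
--     a =n
--     while n>0 :
--         rem = n%10
--         fact = 1
--         while rem > 0 :
--             fact = fact*rem
--             rem-=1
--         total = total + fact
--         n = n//10
--     if a == total :
--         return " strong Number"
--     else :
--         return " NOt strong"
-- ===== SOURCE B (Python) =====
-- def strnum(n):
--     FACT = [1, 1, 2, 6, 24, 120, 720, 5040, 40320, 362880]
--     total = sum(FACT[ord(c) - 48] for c in str(n)) if n > 0 else 0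
--     return " strong Number" if total == n else " NOt strong"
-- ===== Notes on version B (the rewrite author's own statement) =====
-- stated objective: simpler
-- what changed: Replaces arithmetic digit extraction (nested while loops computing each factorial by repeated multiplication) by a single pass over the decimal string with a precomputed factorial table, with an explicit n>0 guard keeping total=0 for non-positive n.
import Mathlib
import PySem

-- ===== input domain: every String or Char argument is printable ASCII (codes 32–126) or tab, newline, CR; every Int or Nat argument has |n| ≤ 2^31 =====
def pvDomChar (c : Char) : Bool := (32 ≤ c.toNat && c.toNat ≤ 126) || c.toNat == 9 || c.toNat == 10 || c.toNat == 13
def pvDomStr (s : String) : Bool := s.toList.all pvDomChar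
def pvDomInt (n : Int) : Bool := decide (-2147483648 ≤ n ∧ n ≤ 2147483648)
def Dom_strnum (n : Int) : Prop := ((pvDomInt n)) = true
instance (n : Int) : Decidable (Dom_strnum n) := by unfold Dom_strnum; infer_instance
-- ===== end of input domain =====

-- B replaces A's nested division/while-loop factorials by one pass over str(n) with a factorial table (objective: simpler).

-- ===== PORT A =====
-- inner while loop: fact = fact*rem; rem -= 1
def strnumInner (rem fact : Int) : Int :=
  if rem > 0 then strnumInner (rem - 1) (fact * rem) else fact
termination_by rem.toNat
decreasing_by omega

-- outer while loop: rem = n%10; fact = …; total += fact; n = n//10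
def strnumOuter (n total : Int) : Int :=
  if n > 0 then
    strnumOuter (PySem.Int.floordiv n 10) (total + strnumInner (PySem.Int.mod n 10) 1)
  else total
termination_by n.toNat
decreasing_by
  rename_i h
  rw [PySem.Int.floordiv_eq_ediv_of_pos (by norm_num)]
  omega

def strnum (n : Int) : String :=
  let a := n
  let total := strnumOuter n 0
  if a = total then " strong Number" else " NOt strong"

-- ===== PORT B =====
def strnumFACT : List Int := [1, 1, 2, 6, 24, 120, 720, 5040, 40320, 362880]

-- FACT[ord(c) - 48]; index is in range for every digit char of str(n), n > 0 (Python would raise otherwise; unreachable)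
def strnumDigitVal (c : Char) : Int :=
  (PySem.List.pyGet? strnumFACT ((c.toNat : Int) - 48)).getD 0

def strnum_alt (n : Int) : String :=
  let total : Int :=
    if n > 0 then ((PySem.Int.toStr n).toList.map strnumDigitVal).sum else 0
  if total = n then " strong Number" else " NOt strong"

-- ===== PRECONDITION & SPEC =====
def Spec_strnum (n : Int) (out : String) : Prop := out = strnum_alt n
instance (n : Int) (out : String) : Decidable (Spec_strnum n out) := by unfold Spec_strnum; infer_instance

-- ===== CLAIM (what is proved, stated in full; the proofs are below) =====
def Claim_equal_strnum : Prop := ∀ (n : Int), Dom_strnum n → Spec_strnum n (strnum n)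

-- ===== LEMMAS AND PROOFS =====

-- sum of factorials of the decimal digits of m
def dsum (m : Nat) : Int :=
  if m = 0 then 0 else ((m % 10).factorial : Int) + dsum (m / 10)
termination_by m
decreasing_by exact Nat.div_lt_self (by omega) (by norm_num)

-- the decimal digit characters of m (big-endian), the shape Nat.toDigits produces
def myDigits (m : Nat) : List Char :=
  if m / 10 = 0 then [Nat.digitChar m] else myDigits (m / 10) ++ [Nat.digitChar (m % 10)]
termination_by m
decreasing_by exact Nat.div_lt_self (by omega) (by norm_num)

theorem strnumInner_mul (d : Nat) : ∀ (fact : Int), strnumInner (d : Int) fact = fact * (d.factorial : Int) := by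
  induction d with
  | zero => intro fact; rw [strnumInner]; simp
  | succ d ih =>
    intro fact
    rw [strnumInner, if_pos (by exact_mod_cast Nat.succ_pos d)]
    have h : ((d + 1 : Nat) : Int) - 1 = (d : Int) := by push_cast; ring
    rw [h, ih]
    push_cast [Nat.factorial]
    ring

theorem strnumInner_eq_factorial (d : Nat) :
    strnumInner (d : Int) 1 = (d.factorial : Int) := by
  rw [strnumInner_mul]; ring

theorem strnumOuter_eq_dsum (m : Nat) : ∀ (total : Int), strnumOuter (m : Int) total = total + dsum m := by
  induction m using Nat.strong_induction_on with
  | _ m ih =>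
    intro total
    by_cases hm : m = 0
    · subst hm
      rw [strnumOuter, dsum]
      norm_num
    · have h1 : PySem.Int.floordiv (m : Int) 10 = ((m / 10 : Nat) : Int) := by
        rw [PySem.Int.floordiv_eq_ediv_of_pos (by norm_num)]; omega
      have h2 : PySem.Int.mod (m : Int) 10 = ((m % 10 : Nat) : Int) := by
        rw [PySem.Int.mod_eq_emod_of_pos (by norm_num)]; omega
      rw [strnumOuter, if_pos (by exact_mod_cast Nat.pos_of_ne_zero hm), h1, h2,
        strnumInner_eq_factorial (m % 10),
        ih (m / 10) (Nat.div_lt_self (Nat.pos_of_ne_zero hm) (by norm_num))]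
      conv_rhs => rw [dsum, if_neg hm]
      ring

theorem toDigitsCore_eq_myDigits :
    ∀ (f m : Nat) (acc : List Char), m < f →
      Nat.toDigitsCore 10 f m acc = myDigits m ++ acc := by
  intro f
  induction f with
  | zero => intro m acc h; omega
  | succ f ih =>
    intro m acc h
    simp only [Nat.toDigitsCore]
    by_cases h10 : m / 10 = 0
    · rw [if_pos h10, myDigits, if_pos h10, Nat.mod_eq_of_lt (by omega)]
      simp
    · conv_rhs => rw [myDigits, if_neg h10]
      rw [if_neg h10, ih (m / 10) _ (by omega)]
      simp

theorem toDigits_eq_myDigits (m : Nat) : Nat.toDigits 10 m = myDigits m := by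
  rw [Nat.toDigits, toDigitsCore_eq_myDigits (m + 1) m [] (Nat.lt_succ_self m)]
  simp

theorem strnumDigitVal_digitChar (d : Nat) (hd : d ≤ 9) :
    strnumDigitVal (Nat.digitChar d) = (d.factorial : Int) := by
  interval_cases d <;> decide

theorem myDigits_sum_eq_dsum (m : Nat) (hm : 0 < m) :
    ((myDigits m).map strnumDigitVal).sum = dsum m := by
  induction m using Nat.strong_induction_on with
  | _ m ih =>
    rw [myDigits]
    by_cases h10 : m / 10 = 0
    · rw [if_pos h10]
      have hlt : m ≤ 9 := by omega
      simp [strnumDigitVal_digitChar m hlt]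
      rw [dsum, if_neg (by omega), h10, Nat.mod_eq_of_lt (by omega), dsum]
      simp
    · rw [if_neg h10]
      simp only [List.map_append, List.sum_append, List.map_cons, List.map_nil,
        List.sum_cons, List.sum_nil]
      rw [ih (m / 10) (Nat.div_lt_self (by omega) (by norm_num)) (by omega),
        strnumDigitVal_digitChar (m % 10) (by omega)]
      conv_rhs => rw [dsum, if_neg (by omega)]
      ring

-- ===== VERDICT (by name: the statement is the Claim_ definition above) =====
theorem strnum_spec : Claim_equal_strnum := by
  intro n _
  unfold Spec_strnum strnum strnum_alt
  by_cases hn : n > 0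
  · have hc : n = ((n.toNat : Nat) : Int) := by omega
    have hA : strnumOuter n 0 = dsum n.toNat := by
      conv_lhs => rw [hc]
      rw [strnumOuter_eq_dsum]
      simp
    have hB : ((PySem.Int.toStr n).toList.map strnumDigitVal).sum = dsum n.toNat := by
      rw [PySem.Int.toList_toStr]
      have : PySem.Int.toChars n = Nat.toDigits 10 n.toNat := by
        rw [PySem.Int.toChars, if_neg (by omega)]
      rw [this, toDigits_eq_myDigits, myDigits_sum_eq_dsum n.toNat (by omega)]
    simp only [hA, if_pos hn, hB]
    rcases eq_or_ne n (dsum n.toNat) with h | h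
    · rw [if_pos h, if_pos h.symm]
    · rw [if_neg h, if_neg (Ne.symm h)]
  · have hA : strnumOuter n 0 = 0 := by rw [strnumOuter, if_neg hn]
    simp only [hA, if_neg hn]
    rcases eq_or_ne n 0 with h | h
    · rw [if_pos h, if_pos h.symm]
    · rw [if_neg h, if_neg (Ne.symm h)]
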